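-- pv_equiv track=rewrite | github.com/gabriellaec/desoft-analise-exercicios | backup/user_154/ch68_2019_03_31_00_00_36_957447.py | separa_trios
-- ===== SOURCE A (Python) =====
-- def separa_trios(lista):
--     result = []
--     trio = []
--
--     for x in lista:
--         trio.append(x)
--         if len(trio) == 3:
--             result.append(trio)
--             trio = []
--
--     return result
-- ===== SOURCE B (Python) =====
-- def separa_trios(lista):
--     n = len(lista) // 3
--     return [lista[3*i:3*i+3] for i in range(n)]
-- ===== Notes on version B (the rewrite author's own statement) =====
-- stated objective: idiomatic
-- what changed: Replaces the buffer-and-flush accumulator loop by computing the number of complete triples (len//3) and slicing fixed 3-element windows at strided indices, discarding the remainder via the index bound.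
import Mathlib
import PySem

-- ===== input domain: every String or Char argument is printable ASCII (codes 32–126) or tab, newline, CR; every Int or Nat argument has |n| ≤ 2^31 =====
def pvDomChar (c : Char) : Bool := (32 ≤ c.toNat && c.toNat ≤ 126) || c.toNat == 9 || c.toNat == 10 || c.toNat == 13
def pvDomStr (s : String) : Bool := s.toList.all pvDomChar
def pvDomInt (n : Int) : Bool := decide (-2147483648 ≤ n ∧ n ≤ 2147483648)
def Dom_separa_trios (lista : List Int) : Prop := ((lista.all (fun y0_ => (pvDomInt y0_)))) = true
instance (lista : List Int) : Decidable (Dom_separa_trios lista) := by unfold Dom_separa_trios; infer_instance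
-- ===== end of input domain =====

-- B groups by strided slicing instead of A's buffer-and-flush loop; objective: idiomatic (same O(n) cost).

-- ===== PORT A =====
-- for x in lista: trio.append(x); if len(trio)==3: result.append(trio); trio=[]
def separa_trios (lista : List Int) : List (List Int) :=
  (lista.foldl
    (fun (s : List (List Int) × List Int) x =>
      let trio := s.2 ++ [x]
      if trio.length = 3 then (s.1 ++ [trio], ([] : List Int)) else (s.1, trio))
    ([], [])).1

-- ===== PORT B =====
-- n = len(lista) // 3 ; [lista[3*i:3*i+3] for i in range(n)]
def separa_trios_alt (lista : List Int) : List (List Int) :=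
  let n : Int := PySem.Int.floordiv (lista.length : Int) 3
  (PySem.List.pyRange 0 n 1).map
    (fun i => PySem.List.slice lista (some (3*i)) (some (3*i+3)))

-- ===== PRECONDITION & SPEC =====
def Spec_separa_trios (lista : List Int) (out : List (List Int)) : Prop := out = separa_trios_alt lista
instance (lista : List Int) (out : List (List Int)) : Decidable (Spec_separa_trios lista out) := by unfold Spec_separa_trios; infer_instance

-- ===== CLAIM (what is proved, stated in full; the proofs are below) =====
def Claim_equal_separa_trios : Prop := ∀ (lista : List Int), Dom_separa_trios lista → Spec_separa_trios lista (separa_trios lista)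

-- ===== LEMMAS AND PROOFS =====

-- canonical form both ports are reduced to
def chunks3 : List Int → List (List Int)
  | a :: b :: c :: t => [a, b, c] :: chunks3 t
  | _ => []

theorem chunks3_short (l : List Int) (h : l.length < 3) : chunks3 l = [] := by
  match l, h with
  | [], _ => rfl
  | [a], _ => rfl
  | [a, b], _ => rfl

-- A's fold with a partial buffer 'trio' (length < 3) produces res ++ chunks3 (trio ++ l)
theorem foldA (l : List Int) (res : List (List Int)) (trio : List Int)
    (h : trio.length < 3) :
    (l.foldl
      (fun (s : List (List Int) × List Int) x =>
        let trio := s.2 ++ [x]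
        if trio.length = 3 then (s.1 ++ [trio], ([] : List Int)) else (s.1, trio))
      (res, trio)).1 = res ++ chunks3 (trio ++ l) := by
  induction l generalizing res trio with
  | nil => simp [chunks3_short trio h]
  | cons x l ih =>
    simp only [List.foldl_cons]
    by_cases h3 : (trio ++ [x]).length = 3
    · have h2 : trio.length = 2 := by simp at h3; omega
      match trio, h2 with
      | [a, b], _ =>
        simp only [if_pos h3]
        rw [ih _ _ (by simp)]
        simp [chunks3]
    · simp only [if_neg h3]
      rw [ih _ _ (by simp at h3 ⊢; omega)]
      simp

theorem A_eq_chunks3 (l : List Int) : separa_trios l = chunks3 l := by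
  have := foldA l [] [] (by simp)
  simpa [separa_trios] using this

theorem fd3 (m : Nat) : PySem.Int.floordiv (m : Int) 3 = ((m / 3 : Nat) : Int) := by
  exact_mod_cast PySem.Int.floordiv_natCast m 3

theorem pyRange0 (n : Nat) : PySem.List.pyRange 0 (n : Int) 1 = (List.range n).map (fun k : Nat => (k : Int)) :=
  PySem.List.pyRange_zero_natCast n

theorem B_eq_chunks3 (l : List Int) : separa_trios_alt l = chunks3 l := by
  induction l using chunks3.induct with
  | case1 a b c t ih =>
    have hn : PySem.Int.floordiv ((a :: b :: c :: t).length : Int) 3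
        = (((t.length / 3 + 1 : Nat)) : Int) := by
      have h1 : ((a :: b :: c :: t).length : Int) = ((t.length + 3 : Nat) : Int) := by
        simp; omega
      rw [h1, fd3]
      have : (t.length + 3) / 3 = t.length / 3 + 1 := by omega
      rw [this]
    rw [separa_trios_alt, hn, pyRange0, List.range_succ_eq_map, List.map_cons, List.map_map,
      List.map_cons, List.map_map, chunks3]
    congr 1
    · -- tail: each slice at 3*(k+1) on a::b::c::t is the slice at 3*k on t
      rw [separa_trios_alt, fd3, pyRange0, List.map_map] at ih
      rw [← ih]
      apply List.map_congr_left
      intro k _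
      simp only [Function.comp]
      have h1 : (3 : Int) * ((Nat.succ k : Nat) : Int) = (((3 * k + 3 : Nat) : Int)) := by push_cast; ring
      have h2 : (((3 * k + 3 : Nat) : Int)) + 3 = (((3 * k + 6 : Nat) : Int)) := by push_cast; ring
      have h3 : (3 : Int) * ((k : Nat) : Int) = (((3 * k : Nat) : Int)) := by push_cast; ring
      have h4 : (((3 * k : Nat) : Int)) + 3 = (((3 * k + 3 : Nat) : Int)) := by push_cast; ring
      rw [h1, h2, h3, h4, PySem.List.slice_natCast, PySem.List.slice_natCast]
      have hd : (a :: b :: c :: t).drop (3 * k + 3) = t.drop (3 * k) := by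
        show (a :: b :: c :: t).drop ((3 * k + 2) + 1) = t.drop (3 * k)
        rw [List.drop_succ_cons]
        show (b :: c :: t).drop ((3 * k + 1) + 1) = t.drop (3 * k)
        rw [List.drop_succ_cons]
        show (c :: t).drop (3 * k + 1) = t.drop (3 * k)
        rw [List.drop_succ_cons]
      rw [hd]
      congr 1
      omega
  | case2 l h =>
    have hlen : l.length < 3 := by
      rcases l with _ | ⟨a, _ | ⟨b, _ | ⟨c, t⟩⟩⟩
      · simp
      · simp
      · simp
      · exact ((h a b c t rfl).elim)
    rw [chunks3_short l hlen, separa_trios_alt, fd3]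
    have h0 : l.length / 3 = 0 := by omega
    rw [h0]
    rw [pyRange0]
    simp

-- ===== VERDICT (by name: the statement is the Claim_ definition above) =====
theorem separa_trios_spec : Claim_equal_separa_trios := by
  intro lista _
  show separa_trios lista = separa_trios_alt lista
  rw [A_eq_chunks3, B_eq_chunks3]
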